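-- pv_equiv track=rewrite | github.com/ManasiB9664/fastapi-app | Extraction_api.py | classify_text
-- ===== SOURCE A (Python) =====
-- from typing import Dict, List
--
-- def classify_text(List_text: List[str]) -> Dict[str, List[str]]:
--     clauses = {
--         "Data Related Clauses": [],
--         "Intellectual Property Related Clauses": [],
--         "Legal Clauses": [],
--         "Monetary Clauses": [],
--         "After Sale Clauses": [],
--         "Customer Service Clauses": []
--     }
--
--     # Define patterns or keywords for classification (this can be expanded)
--     data_keywords = ['data', 'privacy', 'personal information', 'share', 'sell']
--     intellectual_property_keywords = ['intellectual property', 'copyright', 'patent', 'trademark']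
--     legal_keywords = ['law', 'governance', 'jurisdiction', 'dispute']
--     monetary_keywords = ['payment', 'cost', 'fees', 'compensation']
--     after_sale_keywords = ['warranty', 'returns', 'refund', 'exchange']
--     customer_service_keywords = ['customer service', 'support', 'contact']
--
--     # Iterate over the paragraphs (each paragraph is already a separate string in List_text)
--     for paragraph in List_text:
--         classified = False
--         for category, keywords in {
--             "Data Related Clauses": data_keywords,
--             "Intellectual Property Related Clauses": intellectual_property_keywords,
--             "Legal Clauses": legal_keywords,
--             "Monetary Clauses": monetary_keywords,
--             "After Sale Clauses": after_sale_keywords,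
--             "Customer Service Clauses": customer_service_keywords,
--         }.items():
--             if any(keyword.lower() in paragraph.lower() for keyword in keywords):
--                 clauses[category].append(paragraph)
--                 classified = True
--                 break
--
--     return clauses
-- ===== SOURCE B (Python) =====
-- def classify_text(List_text):
--     table = [
--         ("Data Related Clauses", ['data', 'privacy', 'personal information', 'share', 'sell']),
--         ("Intellectual Property Related Clauses", ['intellectual property', 'copyright', 'patent', 'trademark']),
--         ("Legal Clauses", ['law', 'governance', 'jurisdiction', 'dispute']),
--         ("Monetary Clauses", ['payment', 'cost', 'fees', 'compensation']),
--         ("After Sale Clauses", ['warranty', 'returns', 'refund', 'exchange']),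
--         ("Customer Service Clauses", ['customer service', 'support', 'contact']),
--     ]
--     # staged partition: one pass per category over a shrinking pool of
--     # still-unclassified paragraphs, instead of a per-paragraph category scan
--     remaining = [(p, p.lower()) for p in List_text]
--     clauses = {}
--     for cat, kws in table:
--         taken, rest = [], []
--         for p, low in remaining:
--             if any(k in low for k in kws):
--                 taken.append(p)
--             else:
--                 rest.append((p, low))
--         clauses[cat] = taken
--         remaining = rest
--     return clauses
-- ===== Notes on version B (the rewrite author's own statement) =====
-- stated objective: alternative
-- what changed: Inverts the loop nesting: instead of scanning categories per paragraph with a break, B makes one partition pass per category over a shrinking pool of still-unclassified paragraphs (lowercased once up front), assigning each category its whole list at once.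
import Mathlib
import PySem

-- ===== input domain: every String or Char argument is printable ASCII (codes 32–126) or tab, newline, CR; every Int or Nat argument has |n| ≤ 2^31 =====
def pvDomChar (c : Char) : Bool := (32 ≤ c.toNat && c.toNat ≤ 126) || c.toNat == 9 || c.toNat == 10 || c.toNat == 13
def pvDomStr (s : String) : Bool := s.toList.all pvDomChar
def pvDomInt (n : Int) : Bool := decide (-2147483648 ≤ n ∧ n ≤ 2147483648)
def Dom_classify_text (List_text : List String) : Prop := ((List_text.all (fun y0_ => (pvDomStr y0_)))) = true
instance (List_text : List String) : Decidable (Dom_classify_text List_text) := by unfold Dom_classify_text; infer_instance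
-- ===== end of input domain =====

-- B inverts A's loop nesting: one partition pass per category over a shrinking pool of
-- still-unclassified paragraphs (lowercased once), instead of a per-paragraph category scan with a break.

-- ===== PORT A =====
-- the per-paragraph dict of category → keyword list, in A's insertion order
def pvPairsA : List (String × List String) :=
  [("Data Related Clauses", ["data", "privacy", "personal information", "share", "sell"]),
   ("Intellectual Property Related Clauses", ["intellectual property", "copyright", "patent", "trademark"]),
   ("Legal Clauses", ["law", "governance", "jurisdiction", "dispute"]),
   ("Monetary Clauses", ["payment", "cost", "fees", "compensation"]),
   ("After Sale Clauses", ["warranty", "returns", "refund", "exchange"]),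
   ("Customer Service Clauses", ["customer service", "support", "contact"])]

-- A's inner 'for category, keywords … break' loop (the classified flag is dead state and not carried)
def pvInnerA (paragraph : String) (pairs : List (String × List String))
    (clauses : PySem.Dict String (List String)) : PySem.Dict String (List String) :=
  match pairs with
  | [] => clauses
  | (category, keywords) :: rest =>
    if keywords.any (fun kw => PySem.Str.isIn (PySem.Str.lower kw) (PySem.Str.lower paragraph)) then
      clauses.modify category [] (· ++ [paragraph])
    else pvInnerA paragraph rest clauses

def classify_text (List_text : List String) : List (String × List String) :=
  let clauses : PySem.Dict String (List String) :=
    PySem.Dict.ofList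
      [("Data Related Clauses", []), ("Intellectual Property Related Clauses", []),
       ("Legal Clauses", []), ("Monetary Clauses", []), ("After Sale Clauses", []),
       ("Customer Service Clauses", [])]
  (List_text.foldl (fun clauses paragraph => pvInnerA paragraph pvPairsA clauses) clauses).items

-- ===== PORT B =====
-- B's table of (category, keywords), in the original order
def pvTableB : List (String × List String) :=
  [("Data Related Clauses", ["data", "privacy", "personal information", "share", "sell"]),
   ("Intellectual Property Related Clauses", ["intellectual property", "copyright", "patent", "trademark"]),
   ("Legal Clauses", ["law", "governance", "jurisdiction", "dispute"]),
   ("Monetary Clauses", ["payment", "cost", "fees", "compensation"]),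
   ("After Sale Clauses", ["warranty", "returns", "refund", "exchange"]),
   ("Customer Service Clauses", ["customer service", "support", "contact"])]

-- the inner 'for p, low in remaining: … taken.append / rest.append' partition pass
def pvPartB (kws : List String) (remaining : List (String × String)) :
    List String × List (String × String) :=
  remaining.foldl
    (fun acc pl =>
      if kws.any (fun k => PySem.Str.isIn k pl.2) then (acc.1 ++ [pl.1], acc.2)
      else (acc.1, acc.2 ++ [pl]))
    ([], [])

-- the outer 'for cat, kws in table' loop, threading remaining and clauses
def pvGoB (table : List (String × List String)) (remaining : List (String × String))
    (clauses : PySem.Dict String (List String)) : PySem.Dict String (List String) :=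
  match table with
  | [] => clauses
  | (cat, kws) :: rest =>
    let tr := pvPartB kws remaining
    pvGoB rest tr.2 (clauses.insert cat tr.1)

def classify_text_alt (List_text : List String) : List (String × List String) :=
  (pvGoB pvTableB (List_text.map (fun p => (p, PySem.Str.lower p))) PySem.Dict.empty).items

-- ===== PRECONDITION & SPEC =====
def Spec_classify_text (List_text : List String) (out : List (String × List String)) : Prop := out = classify_text_alt List_text
instance (List_text : List String) (out : List (String × List String)) : Decidable (Spec_classify_text List_text out) := by unfold Spec_classify_text; infer_instance

-- ===== CLAIM (what is proved, stated in full; the proofs are below) =====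
def Claim_equal_classify_text : Prop := ∀ (List_text : List String), Dom_classify_text List_text → Spec_classify_text List_text (classify_text List_text)

-- ===== LEMMAS AND PROOFS =====

-- first category (scanning the table in order) one of whose keywords occurs in `low`
def pvFirstCat (low : String) (table : List (String × List String)) : Option String :=
  match table with
  | [] => none
  | (cat, kws) :: rest =>
    if kws.any (fun k => PySem.Str.isIn k low) then some cat else pvFirstCat low rest

theorem pvFirstCat_mem (low : String) (table : List (String × List String)) (c : String)
    (h : pvFirstCat low table = some c) : c ∈ table.map Prod.fst := by
  induction table with
  | nil => simp [pvFirstCat] at h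
  | cons pr rest ih =>
    obtain ⟨cat, kws⟩ := pr
    simp only [pvFirstCat] at h
    split_ifs at h with hk
    · simp at h; simp [h]
    · simpa using Or.inr (by simpa using ih h)

-- A's keyword tests lower each keyword; on A's literal table that is the identity
theorem pvPairsA_lower :
    pvPairsA.map (fun x => (x.1, x.2.map PySem.Str.lower)) = pvTableB := by decide

-- A's inner loop = modify at the first matching category
theorem pvInner_eq_firstCat (p : String) (pairs : List (String × List String))
    (c : PySem.Dict String (List String)) :
    pvInnerA p pairs c =
      match pvFirstCat (PySem.Str.lower p) (pairs.map (fun x => (x.1, x.2.map PySem.Str.lower))) with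
      | some cat => c.modify cat [] (· ++ [p])
      | none => c := by
  induction pairs generalizing c with
  | nil => simp [pvInnerA, pvFirstCat]
  | cons pr rest ih =>
    obtain ⟨cat, kws⟩ := pr
    simp only [pvInnerA, List.map_cons, pvFirstCat, List.any_map, Function.comp_def]
    split_ifs with h
    · rfl
    · exact ih c

-- the partition fold, for an arbitrary test
theorem pvPart_gen (q : String × String → Bool) (rem : List (String × String)) :
    rem.foldl (fun acc pl => if q pl then (acc.1 ++ [pl.1], acc.2) else (acc.1, acc.2 ++ [pl]))
        ([], []) =
      ((rem.filter q).map Prod.fst, rem.filter (fun pl => !q pl)) := by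
  induction rem using List.reverseRecOn with
  | nil => simp
  | append_singleton xs x ih =>
    rw [List.foldl_append, ih]
    simp only [List.foldl_cons, List.foldl_nil, List.filter_append, List.map_append]
    by_cases h : q x = true
    · rw [if_pos h]; simp [h]
    · rw [if_neg h]; simp [h]

-- B's partition pass, in closed form
theorem pvPartB_eq (kws : List String) (rem : List (String × String)) :
    pvPartB kws rem =
      ((rem.filter (fun pl => kws.any (fun k => PySem.Str.isIn k pl.2))).map Prod.fst,
       rem.filter (fun pl => !kws.any (fun k => PySem.Str.isIn k pl.2))) :=
  pvPart_gen _ rem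

-- B's outer loop, in closed form: each category receives exactly the pool elements whose
-- first matching category (in the table suffix) is that category
theorem pvGoB_items (table : List (String × List String)) (rem : List (String × String))
    (d : PySem.Dict String (List String))
    (hnd : (table.map Prod.fst).Nodup)
    (hfresh : ∀ c ∈ table.map Prod.fst, d.contains c = false) :
    (pvGoB table rem d).items =
      d.items ++ table.map (fun x =>
        (x.1, (rem.filter (fun pl => pvFirstCat pl.2 table == some x.1)).map Prod.fst)) := by
  induction table generalizing rem d with
  | nil => simp [pvGoB]
  | cons pr rest ih =>
    obtain ⟨cat, kws⟩ := pr
    simp only [List.map_cons, List.nodup_cons] at hnd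
    have hcat : cat ∉ rest.map Prod.fst := hnd.1
    have hdc : d.contains cat = false := hfresh cat (by simp)
    simp only [pvGoB, pvPartB_eq]
    rw [ih _ _ hnd.2 (fun c hc => by
      rw [PySem.Dict.contains_insert]
      have : c ≠ cat := fun he => hcat (he ▸ hc)
      simp [this, hfresh c (by simp [hc])])]
    rw [PySem.Dict.items_insert_of_not_contains _ _ hdc]
    simp only [List.map_cons, List.append_assoc, List.cons_append, List.nil_append]
    congr 2
    · -- head category: matching kws ↔ first category of the whole table is cat
      refine congrArg (fun l => (cat, List.map Prod.fst l)) (List.filter_congr ?_)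
      intro pl _
      simp only [pvFirstCat]
      split_ifs with h
      · simpa using h
      · simp only [h]
        rcases he : pvFirstCat pl.2 rest with _ | c
        · simp
        · have := pvFirstCat_mem _ _ _ he
          have : c ≠ cat := fun hc => hcat (hc ▸ this)
          simp [this]
    · -- remaining categories: filtering out kws-matches then matching in rest
      apply List.map_congr_left
      intro x hx
      refine congrArg (fun l => (x.1, List.map Prod.fst l)) ?_
      rw [List.filter_filter]
      refine List.filter_congr ?_
      intro pl _
      simp only [pvFirstCat]
      split_ifs with h
      · have hb : (kws.any fun k => PySem.Chars.isIn k.toList pl.2.toList) = true := h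
        have hne : x.1 ≠ cat := fun he => hcat (he ▸ List.mem_map_of_mem hx)
        simp [hb, Ne.symm hne]
      · have hb : (kws.any fun k => PySem.Chars.isIn k.toList pl.2.toList) = false :=
          Bool.eq_false_iff.mpr (fun hc => h hc)
        simp [hb]

-- every category pvFirstCat can return on B's table is one of A's six dict keys
theorem pvCats_sub : ∀ c ∈ pvTableB.map Prod.fst,
    c ∈ (PySem.Dict.ofList
      [("Data Related Clauses", ([] : List String)), ("Intellectual Property Related Clauses", []),
       ("Legal Clauses", []), ("Monetary Clauses", []), ("After Sale Clauses", []),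
       ("Customer Service Clauses", [])]).keys := by decide

-- A's initial dict maps each of its keys to []
theorem pvD0_getD (c : String)
    (hc : c ∈ (PySem.Dict.ofList
      [("Data Related Clauses", ([] : List String)), ("Intellectual Property Related Clauses", []),
       ("Legal Clauses", []), ("Monetary Clauses", []), ("After Sale Clauses", []),
       ("Customer Service Clauses", [])]).keys) :
    (PySem.Dict.ofList
      [("Data Related Clauses", ([] : List String)), ("Intellectual Property Related Clauses", []),
       ("Legal Clauses", []), ("Monetary Clauses", []), ("After Sale Clauses", []),
       ("Customer Service Clauses", [])]).getD c [] = [] := by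
  fin_cases hc <;> decide

-- the (category, paragraph) pair list, filtered at one category, gives back the paragraphs
-- whose first matching category is that one
theorem pvL_filter (ps : List String) (c : String) :
    (((ps.filterMap (fun p =>
        (pvFirstCat (PySem.Str.lower p) pvTableB).map (fun c => (c, p)))).filter
          (fun x => x.1 == c)).map Prod.snd) =
      ps.filter (fun p => pvFirstCat (PySem.Str.lower p) pvTableB == some c) := by
  induction ps with
  | nil => rfl
  | cons p ps ih =>
    simp only [List.filterMap_cons, List.filter_cons]
    rcases h : pvFirstCat (PySem.Str.lower p) pvTableB with _ | c'
    · simpa [h] using ih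
    · by_cases he : c' = c <;> simp [he, ih]

-- filtering the lowered pool = filtering the paragraphs by their first category
theorem pvPool_filter (ps : List String) (tbl : List (String × List String)) (c : String) :
    ((ps.map (fun p => (p, PySem.Str.lower p))).filter
        (fun pl => pvFirstCat pl.2 tbl == some c)).map Prod.fst =
      ps.filter (fun p => pvFirstCat (PySem.Str.lower p) tbl == some c) := by
  rw [List.filter_map, List.map_map]
  simp [Function.comp_def]

-- ===== VERDICT (by name: the statement is the Claim_ definition above) =====
theorem classify_text_spec : Claim_equal_classify_text := by
  intro List_text hdom
  clear hdom
  show classify_text List_text = classify_text_alt List_text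
  simp only [classify_text, classify_text_alt]
  -- rewrite A's fold into a fold over (category, paragraph) pairs, skipping unmatched paragraphs
  have hstep : ∀ (d : PySem.Dict String (List String)),
      List_text.foldl (fun clauses paragraph => pvInnerA paragraph pvPairsA clauses) d =
      (List_text.filterMap (fun p =>
          (pvFirstCat (PySem.Str.lower p) pvTableB).map (fun c => (c, p)))).foldl
        (fun d x => d.modify x.1 [] (· ++ [x.2])) d := by
    intro d
    induction List_text generalizing d with
    | nil => rfl
    | cons p ps ih =>
      simp only [List.foldl_cons, List.filterMap_cons]
      rw [pvInner_eq_firstCat, pvPairsA_lower]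
      rcases h : pvFirstCat (PySem.Str.lower p) pvTableB with _ | c <;> simp [ih]
  rw [hstep]
  set d0 : PySem.Dict String (List String) :=
    PySem.Dict.ofList
      [("Data Related Clauses", []), ("Intellectual Property Related Clauses", []),
       ("Legal Clauses", []), ("Monetary Clauses", []), ("After Sale Clauses", []),
       ("Customer Service Clauses", [])] with hd0
  set l := List_text.filterMap (fun p =>
      (pvFirstCat (PySem.Str.lower p) pvTableB).map (fun c => (c, p))) with hl
  -- A's side: keys stay the six categories, values accumulate by getD_foldl_modify_append
  have hkeysA : (l.foldl (fun d x => d.modify x.1 [] (· ++ [x.2])) d0).keys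
      = PySem.Set.update d0.keys (l.map Prod.fst) := PySem.Dict.keys_foldl_modify_key l Prod.fst _ _ d0
  have hsub : ∀ x ∈ l.map Prod.fst, x ∈ d0.keys := by
    intro x hx
    simp only [hl, List.map_filterMap, List.mem_filterMap] at hx
    obtain ⟨p, -, hp⟩ := hx
    rcases h : pvFirstCat (PySem.Str.lower p) pvTableB with _ | c <;> simp [h] at hp
    have hm := pvFirstCat_mem _ _ _ h
    subst hp
    exact pvCats_sub _ hm
  have hkeys0 : PySem.Set.update d0.keys (l.map Prod.fst) = d0.keys := by
    rw [PySem.Set.update_eq_append_filter]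
    have : (PySem.Set.ofList (l.map Prod.fst)).filter
        (fun y => !(PySem.Set.contains d0.keys y)) = [] := by
      rw [List.filter_eq_nil_iff]
      intro a ha
      have : a ∈ l.map Prod.fst := (PySem.Set.mem_ofList _ _).mp ha
      simp [PySem.Set.contains, List.contains_eq_mem, hsub a this]
    rw [this, List.append_nil]
  have hndA : (l.foldl (fun d x => d.modify x.1 [] (· ++ [x.2])) d0).keys.Nodup := by
    exact PySem.Dict.nodup_keys_foldl_modify_key l Prod.fst _ _ d0 (by decide)
  rw [PySem.Dict.items_eq_map_keys _ hndA ([] : List String), hkeysA, hkeys0]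
  rw [pvGoB_items pvTableB _ PySem.Dict.empty (by decide) (by intro c _; rfl)]
  have hd0keys : d0.keys = pvTableB.map Prod.fst := by decide
  have hempty : (PySem.Dict.empty : PySem.Dict String (List String)).items = [] := rfl
  rw [hd0keys, hempty, List.nil_append, List.map_map]
  apply List.map_congr_left
  intro x hx
  simp only [Function.comp_def]
  have hmem : x.1 ∈ (PySem.Dict.ofList
      [("Data Related Clauses", ([] : List String)), ("Intellectual Property Related Clauses", []),
       ("Legal Clauses", []), ("Monetary Clauses", []), ("After Sale Clauses", []),
       ("Customer Service Clauses", [])]).keys := by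
    rw [← hd0, hd0keys]; exact List.mem_map_of_mem hx
  have hval : (l.foldl (fun d x => d.modify x.1 [] (· ++ [x.2])) d0).getD x.1 [] =
      List_text.filter (fun p => pvFirstCat (PySem.Str.lower p) pvTableB == some x.1) := by
    rw [PySem.Dict.getD_foldl_modify_append, hd0, pvD0_getD x.1 hmem, List.nil_append, hl,
      pvL_filter]
  rw [hval, pvPool_filter]
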